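-- pv_equiv track=rewrite | github.com/Tropinene/advent_of_code | 2016/day24/day24.py | find_all_coordinates
-- ===== SOURCE A (Python) =====
-- def find_all_coordinates(map_data):
--     all_coordinates_list = []
--
--     for num in "01234567":
--         for i in range(len(map_data)):
--             for j in range(len(map_data[0])):
--                 if map_data[i][j] == num:
--                     all_coordinates_list.append((i, j))
--
--     return all_coordinates_list
-- ===== SOURCE B (Python) =====
-- def find_all_coordinates(map_data):
--     buckets = [[] for _ in range(8)]
--     for i in range(len(map_data)):
--         for j in range(len(map_data[0])):
--             n = ord(map_data[i][j])
--             if 48 <= n <= 55: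
--                 buckets[n - 48].append((i, j))
--     out = []
--     for b in buckets:
--         out += b
--     return out
-- ===== Notes on version B (the rewrite author's own statement) =====
-- stated objective: faster
-- what changed: Single row-major pass distributing coordinates into eight per-digit buckets that are concatenated at the end, instead of rescanning the whole grid once per digit.
-- outside the precondition, e.g. on find_all_coordinates(['01', '2']): A raises IndexError, B raises IndexError
import Mathlib
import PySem

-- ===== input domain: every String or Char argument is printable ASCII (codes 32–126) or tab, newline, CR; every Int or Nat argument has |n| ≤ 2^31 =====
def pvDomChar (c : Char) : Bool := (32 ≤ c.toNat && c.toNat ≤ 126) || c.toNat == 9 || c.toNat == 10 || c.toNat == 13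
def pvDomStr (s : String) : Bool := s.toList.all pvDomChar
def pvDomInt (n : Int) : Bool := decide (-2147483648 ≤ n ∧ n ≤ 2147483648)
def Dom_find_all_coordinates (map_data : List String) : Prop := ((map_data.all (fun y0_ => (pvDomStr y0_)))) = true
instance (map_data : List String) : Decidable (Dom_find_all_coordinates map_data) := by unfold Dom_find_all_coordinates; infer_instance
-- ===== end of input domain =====

-- B makes one pass over the grid, bucketing coordinates per digit, then concatenates the eight buckets (A rescans the grid once per digit); return-value equivalence proved on grids whose rows are at least as long as the first row (elsewhere Python A raises IndexError).


-- ===== PORT A =====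
-- map_data[i][j] as an Option (none = IndexError; in-range indices only are reached inside Pre_)
def pvCell (map_data : List String) (i j : Nat) : Option Char :=
  (map_data[i]?).bind (fun r => r.toList[j]?)

-- len(map_data[0]) (only evaluated by the loops when map_data is nonempty)
def pvWidth (map_data : List String) : Nat :=
  match map_data with | [] => 0 | r :: _ => r.toList.length

def find_all_coordinates (map_data : List String) : List (Int × Int) :=
  "01234567".toList.foldl (fun acc num =>
    (List.range map_data.length).foldl (fun acc i =>
      (List.range (pvWidth map_data)).foldl (fun acc j =>
        if pvCell map_data i j = some num then acc ++ [((i : Int), (j : Int))] else acc)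
        acc)
      acc)
    []

-- ===== PORT B =====
def find_all_coordinates_alt (map_data : List String) : List (Int × Int) :=
  let buckets :=
    (List.range map_data.length).foldl (fun bs i =>
      (List.range (pvWidth map_data)).foldl (fun bs j =>
        match pvCell map_data i j with
        | some c =>
          if 48 ≤ c.toNat ∧ c.toNat ≤ 55 then
            bs.set (c.toNat - 48) ((bs.getD (c.toNat - 48) []) ++ [((i : Int), (j : Int))])
          else bs
        | none => bs)
        bs)
      (List.replicate 8 ([] : List (Int × Int)))
  buckets.flatten

-- ===== PRECONDITION & SPEC =====
-- Pre_ excludes ragged grids on which some row is shorter than the first row: there Python A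
-- (and Python B) raises IndexError.
def Pre_find_all_coordinates (map_data : List String) : Prop :=
  ∀ s ∈ map_data, (match map_data with | [] => 0 | r :: _ => r.toList.length) ≤ s.toList.length
instance (map_data : List String) : Decidable (Pre_find_all_coordinates map_data) := by
  unfold Pre_find_all_coordinates; infer_instance

def pvWitness_find_all_coordinates : List String := ["012", "7 0", "..1"]

def Spec_find_all_coordinates (map_data : List String) (out : List (Int × Int)) : Prop := out = find_all_coordinates_alt map_data
instance (map_data : List String) (out : List (Int × Int)) : Decidable (Spec_find_all_coordinates map_data out) := by unfold Spec_find_all_coordinates; infer_instance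

-- ===== CLAIM (what is proved, stated in full; the proofs are below) =====
def Claim_equal_find_all_coordinates : Prop := ∀ (map_data : List String), Dom_find_all_coordinates map_data → Pre_find_all_coordinates map_data → Spec_find_all_coordinates map_data (find_all_coordinates map_data)

-- ===== LEMMAS AND PROOFS =====

-- the grid's cell coordinates in row-major order
def pvCells (md : List String) : List (Nat × Nat) :=
  (List.range md.length).flatMap (fun i => (List.range (pvWidth md)).map (fun j => (i, j)))

-- the coordinates of digit d (0..7), row-major — common shape of both sides
def pvSel (md : List String) (d : Nat) : List (Int × Int) :=
  ((pvCells md).filter (fun c => pvCell md c.1 c.2 = some (Char.ofNat (48 + d)))).map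
    (fun c => ((c.1 : Int), (c.2 : Int)))

theorem pv_foldl_flatMap {α β γ : Type} (l : List α) (h : α → List β) (g : γ → β → γ) (init : γ) :
    (l.flatMap h).foldl g init = l.foldl (fun acc a => (h a).foldl g acc) init := by
  induction l generalizing init with
  | nil => rfl
  | cons x xs ih => simp [List.flatMap_cons, List.foldl_append, ih]

theorem pv_set_map_range {α : Type} (n k : Nat) (f : Nat → α) (v : α) :
    ((List.range n).map f).set k v = (List.range n).map (fun d => if d = k then v else f d) := by
  apply List.ext_getElem
  · simp
  · intro i h1 h2
    simp only [List.getElem_set, List.getElem_map, List.getElem_range] at *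
    rcases eq_or_ne k i with rfl | h
    · simp
    · simp [h, Ne.symm h]

theorem pv_A_flatMap (md : List String) :
    find_all_coordinates md =
      "01234567".toList.flatMap (fun num =>
        ((pvCells md).filter (fun c => pvCell md c.1 c.2 = some num)).map
          (fun c => ((c.1 : Int), (c.2 : Int)))) := by
  unfold find_all_coordinates
  have hfun : (fun (acc : List (Int × Int)) (num : Char) =>
      (List.range md.length).foldl (fun acc i =>
        (List.range (pvWidth md)).foldl (fun acc j =>
          if pvCell md i j = some num then acc ++ [((i : Int), (j : Int))] else acc) acc) acc)
      = (fun acc num => acc ++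
          ((pvCells md).filter (fun c => pvCell md c.1 c.2 = some num)).map
            (fun c => ((c.1 : Int), (c.2 : Int)))) := by
    funext acc num
    rw [show (pvCells md).filter (fun c => pvCell md c.1 c.2 = some num)
          = (pvCells md).filter (fun c => decide (pvCell md c.1 c.2 = some num)) from rfl]
    rw [← PySem.List.foldl_append_ite (p := fun c : Nat × Nat => pvCell md c.1 c.2 = some num)
        (f := fun c : Nat × Nat => ((c.1 : Int), (c.2 : Int)))]
    unfold pvCells
    rw [pv_foldl_flatMap]
    congr 1
    funext a i
    rw [List.foldl_map]
  rw [hfun, PySem.List.foldl_append_eq_flatMap, List.nil_append]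

-- one step of B's bucket update, as used in the invariant proof
def pvStep (md : List String) (bs : List (List (Int × Int))) (c : Nat × Nat) :
    List (List (Int × Int)) :=
  match pvCell md c.1 c.2 with
  | some ch =>
    if 48 ≤ ch.toNat ∧ ch.toNat ≤ 55 then
      bs.set (ch.toNat - 48) ((bs.getD (ch.toNat - 48) []) ++ [((c.1 : Int), (c.2 : Int))])
    else bs
  | none => bs

theorem pv_char_eq_ofNat (ch : Char) (m : Nat) (hm : m < 55296) :
    ch = Char.ofNat m ↔ ch.toNat = m := by
  constructor
  · rintro rfl
    rw [Char.toNat_ofNat, if_pos (Or.inl hm)]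
  · intro h
    have := Char.ofNat_toNat ch
    rw [h] at this
    exact this.symm

theorem pv_bucket_inv (md : List String) (cells : List (Nat × Nat)) (f : Nat → List (Int × Int)) :
    cells.foldl (pvStep md) ((List.range 8).map f)
      = (List.range 8).map (fun d => f d ++
          ((cells.filter (fun c => pvCell md c.1 c.2 = some (Char.ofNat (48 + d)))).map
            (fun c => ((c.1 : Int), (c.2 : Int))))) := by
  induction cells generalizing f with
  | nil => simp
  | cons c cs ih =>
    rw [List.foldl_cons]
    rcases hcell : pvCell md c.1 c.2 with _ | ch
    · have hstep : pvStep md ((List.range 8).map f) c = (List.range 8).map f := by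
        simp [pvStep, hcell]
      rw [hstep, ih]
      apply List.map_congr_left
      intro d hd
      rw [List.filter_cons_of_neg (by simp [hcell])]
    · by_cases hrange : 48 ≤ ch.toNat ∧ ch.toNat ≤ 55
      · have hdlt : ch.toNat - 48 < 8 := by omega
        have hgetD : ((List.range 8).map f).getD (ch.toNat - 48) [] = f (ch.toNat - 48) := by
          simp [List.getD, hdlt]
        have hstep : pvStep md ((List.range 8).map f) c
            = (List.range 8).map (fun d => if d = (ch.toNat - 48) then f (ch.toNat - 48) ++ [((c.1 : Int), (c.2 : Int))] else f d) := by
          simp only [pvStep, hcell, if_pos hrange]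
          rw [hgetD, pv_set_map_range _ _ _ _]
        rw [hstep, ih]
        apply List.map_congr_left
        intro d hd
        have hd8 : d < 8 := by simpa using hd
        have hiff : (pvCell md c.1 c.2 = some (Char.ofNat (48 + d))) ↔ d = (ch.toNat - 48) := by
          rw [hcell]
          constructor
          · intro h
            have := (pv_char_eq_ofNat ch (48 + d) (by omega)).mp (Option.some.injEq .. ▸ h)
            omega
          · intro h
            subst h
            have : ch = Char.ofNat (48 + (ch.toNat - 48)) := by
              rw [pv_char_eq_ofNat ch (48 + (ch.toNat - 48)) (by omega)]; omega
            rw [← this]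
        by_cases hdd : d = (ch.toNat - 48)
        · rw [List.filter_cons_of_pos (by simp only [decide_eq_true_eq]; exact hiff.mpr hdd),
            if_pos hdd, hdd]
          simp
        · rw [List.filter_cons_of_neg (by simp [hiff, hdd]), if_neg hdd]
      · have hstep : pvStep md ((List.range 8).map f) c = (List.range 8).map f := by
          simp [pvStep, hcell, hrange]
        rw [hstep, ih]
        apply List.map_congr_left
        intro d hd
        have hd8 : d < 8 := by simpa using hd
        have : ¬ (pvCell md c.1 c.2 = some (Char.ofNat (48 + d))) := by
          rw [hcell]
          intro h
          have := (pv_char_eq_ofNat ch (48 + d) (by omega)).mp (Option.some.injEq .. ▸ h)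
          omega
        rw [List.filter_cons_of_neg (by simpa using this)]

theorem pv_B_flatMap (md : List String) :
    find_all_coordinates_alt md = (List.range 8).flatMap (pvSel md) := by
  unfold find_all_coordinates_alt
  have hfold : (List.range md.length).foldl (fun bs i =>
      (List.range (pvWidth md)).foldl (fun bs j =>
        match pvCell md i j with
        | some c =>
          if 48 ≤ c.toNat ∧ c.toNat ≤ 55 then
            bs.set (c.toNat - 48) ((bs.getD (c.toNat - 48) []) ++ [((i : Int), (j : Int))])
          else bs
        | none => bs) bs) (List.replicate 8 ([] : List (Int × Int)))
      = (pvCells md).foldl (pvStep md) (List.replicate 8 []) := by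
    unfold pvCells
    rw [pv_foldl_flatMap]
    congr 1
    funext bs i
    rw [List.foldl_map]
    rfl
  rw [hfold,
    show (List.replicate 8 ([] : List (Int × Int))) = (List.range 8).map (fun _ => []) by decide,
    pv_bucket_inv]
  unfold pvSel
  simp [List.flatMap]

theorem pv_digits : "01234567".toList = (List.range 8).map (fun d => Char.ofNat (48 + d)) := by
  decide

-- ===== VERDICT (by name: the statement is the Claim_ definition above) =====
theorem find_all_coordinates_spec : Claim_equal_find_all_coordinates := by
  intro md _ _
  unfold Spec_find_all_coordinates
  rw [pv_A_flatMap, pv_B_flatMap, pv_digits, List.flatMap_map]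
  rfl
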